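-- pv_equiv track=rewrite | github.com/Fightingkeyboard/CompSci | 11/phrase dictionary.py | buildwordlist
-- ===== SOURCE A (Python) =====
-- def buildwordlist(text):
--     l = []
--     d = {}
--     for w in text.split():
--         w = w.lower()
--         word = ''
--         for x in w:
--             if x.isalpha():
--                 word += x
--         if word != '':
--             l.append(word)
--     return l
-- ===== SOURCE B (Python) =====
-- def buildwordlist(text):
--     filtered = ''.join(c for c in text if c.isalpha() or c.isspace())
--     return filtered.lower().split()
-- ===== Notes on version B (the rewrite author's own statement) =====
-- stated objective: simpler
-- what changed: A splits the text into words and runs an inner per-character loop building each word from its alphabetic characters; B makes one pass over the whole text keeping only letters and whitespace, then returns the lowercased filtered string's split(), so the inner loop and the nonempty-word guard disappear into a single filter + split.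
import Mathlib
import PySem

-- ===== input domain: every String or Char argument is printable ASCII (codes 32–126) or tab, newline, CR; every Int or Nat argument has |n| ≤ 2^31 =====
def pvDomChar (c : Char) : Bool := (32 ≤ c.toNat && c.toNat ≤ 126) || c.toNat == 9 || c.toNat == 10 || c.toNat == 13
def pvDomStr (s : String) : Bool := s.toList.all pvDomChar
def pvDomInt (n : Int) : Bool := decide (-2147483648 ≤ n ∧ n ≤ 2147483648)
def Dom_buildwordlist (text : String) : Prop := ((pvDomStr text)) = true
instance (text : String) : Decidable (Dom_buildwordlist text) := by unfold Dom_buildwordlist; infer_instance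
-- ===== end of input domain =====

-- B replaces A's split-then-per-word-char-loop by one whole-text character filter (keeping letters and
-- whitespace) followed by lower().split(); objective: simpler.

-- ===== PORT A =====
-- (A's 'd = {}' is dead code — never read or written — and is omitted; the word string is built as a List Char)
def buildwordlist (text : String) : List String :=
  (PySem.Str.split₀ text).foldl
    (fun l w =>
      let w2 := PySem.Str.lower w
      let word := w2.toList.foldl
        (fun word x => if PySem.Chars.isalpha x then word ++ [x] else word) ([] : List Char)
      if word ≠ [] then l ++ [String.ofList word] else l)
    []

-- ===== PORT B =====
def buildwordlist_alt (text : String) : List String :=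
  let filtered := String.ofList
    (text.toList.filter (fun c => PySem.Chars.isalpha c || PySem.Chars.isspace c))
  PySem.Str.split₀ (PySem.Str.lower filtered)

-- ===== PRECONDITION & SPEC =====
def Spec_buildwordlist (text : String) (out : List String) : Prop := out = buildwordlist_alt text
instance (text : String) (out : List String) : Decidable (Spec_buildwordlist text out) := by unfold Spec_buildwordlist; infer_instance

-- ===== CLAIM (what is proved, stated in full; the proofs are below) =====
def Claim_equal_buildwordlist : Prop := ∀ (text : String), Dom_buildwordlist text → Spec_buildwordlist text (buildwordlist text)

-- ===== LEMMAS AND PROOFS =====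

theorem pv_char_le (a c : Char) : a ≤ c ↔ a.toNat ≤ c.toNat := by
  rw [Char.le_def, UInt32.le_iff_toNat_le]; rfl

theorem pv_isupper_iff (c : Char) : PySem.Chars.isupper c = true ↔ 65 ≤ c.toNat ∧ c.toNat ≤ 90 := by
  simp only [PySem.Chars.isupper, Bool.and_eq_true, decide_eq_true_eq, pv_char_le]
  simp

theorem pv_islower_iff (c : Char) : PySem.Chars.islower c = true ↔ 97 ≤ c.toNat ∧ c.toNat ≤ 122 := by
  simp only [PySem.Chars.islower, Bool.and_eq_true, decide_eq_true_eq, pv_char_le]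
  simp

theorem pv_toNat_lowerChar (c : Char) (h : PySem.Chars.isupper c = true) :
    (PySem.Chars.lowerChar c).toNat = c.toNat + 32 := by
  have hb := (pv_isupper_iff c).1 h
  simp only [PySem.Chars.lowerChar, h, if_true, Char.toNat_ofNat]
  rw [if_pos]
  left; omega

theorem pv_isspace_iff (c : Char) : PySem.Chars.isspace c = true ↔
    (c.toNat = 32 ∨ (9 ≤ c.toNat ∧ c.toNat ≤ 13) ∨ (28 ≤ c.toNat ∧ c.toNat ≤ 31) ∨ c.toNat = 133 ∨ c.toNat = 160 ∨ c.toNat = 5760 ∨ (8192 ≤ c.toNat ∧ c.toNat ≤ 8202) ∨ c.toNat = 8232 ∨ c.toNat = 8233 ∨ c.toNat = 8239 ∨ c.toNat = 8287 ∨ c.toNat = 12288) := by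
  simp only [PySem.Chars.isspace, Bool.or_eq_true, Bool.and_eq_true, decide_eq_true_eq]
  tauto

theorem pv_isspace_lowerChar (c : Char) :
    PySem.Chars.isspace (PySem.Chars.lowerChar c) = PySem.Chars.isspace c := by
  by_cases h : PySem.Chars.isupper c = true
  · have hb := (pv_isupper_iff c).1 h
    have ht := pv_toNat_lowerChar c h
    have h1 : PySem.Chars.isspace (PySem.Chars.lowerChar c) = false := by
      rw [Bool.eq_false_iff, Ne, pv_isspace_iff, ht]; omega
    have h2 : PySem.Chars.isspace c = false := by
      rw [Bool.eq_false_iff, Ne, pv_isspace_iff]; omega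
    rw [h1, h2]
  · simp [PySem.Chars.lowerChar, h]

theorem pv_isalpha_lowerChar (c : Char) :
    PySem.Chars.isalpha (PySem.Chars.lowerChar c) = PySem.Chars.isalpha c := by
  by_cases h : PySem.Chars.isupper c = true
  · have hb := (pv_isupper_iff c).1 h
    have ht := pv_toNat_lowerChar c h
    have h1 : PySem.Chars.islower (PySem.Chars.lowerChar c) = true := by
      rw [pv_islower_iff, ht]; omega
    have h2 : PySem.Chars.isalpha c = true := by
      simp [PySem.Chars.isalpha, h]
    simp [PySem.Chars.isalpha, h1]
    exact Or.inl h
  · simp [PySem.Chars.lowerChar, h]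

theorem pv_not_space_of_alpha (c : Char) (h : PySem.Chars.isalpha c = true) :
    PySem.Chars.isspace c = false := by
  have h' : PySem.Chars.isupper c = true ∨ PySem.Chars.islower c = true := by
    simpa [PySem.Chars.isalpha] using h
  rcases h' with hu | hl
  · have := (pv_isupper_iff c).1 hu
    rw [Bool.eq_false_iff, Ne, pv_isspace_iff]; omega
  · have := (pv_islower_iff c).1 hl
    rw [Bool.eq_false_iff, Ne, pv_isspace_iff]; omega

theorem pv_go_lower (s cur : List Char) (acc : List (List Char)) :
    PySem.Chars.split₀.go (s.map PySem.Chars.lowerChar) (cur.map PySem.Chars.lowerChar)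
        (acc.map (List.map PySem.Chars.lowerChar))
      = (PySem.Chars.split₀.go s cur acc).map (List.map PySem.Chars.lowerChar) := by
  induction s generalizing cur acc with
  | nil =>
    simp [PySem.Chars.split₀.go]
    split <;> simp
  | cons c rest ih =>
    simp only [List.map_cons, PySem.Chars.split₀.go, pv_isspace_lowerChar]
    by_cases hs : PySem.Chars.isspace c = true
    · simp only [hs, if_true]
      by_cases he : cur.isEmpty
      · simpa [he] using ih [] acc
      · simpa [he] using ih [] (cur.reverse :: acc)
    · simp only [Bool.not_eq_true] at hs
      simpa [hs] using ih (c :: cur) acc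

theorem pv_split₀_lower (s : List Char) :
    PySem.Chars.split₀ (PySem.Chars.lower s)
      = (PySem.Chars.split₀ s).map (List.map PySem.Chars.lowerChar) := by
  simpa [PySem.Chars.split₀, PySem.Chars.lower] using pv_go_lower s [] []

theorem pv_go_filter (s cur : List Char) (acc : List (List Char)) :
    PySem.Chars.split₀.go
        (s.filter (fun c => PySem.Chars.isalpha c || PySem.Chars.isspace c))
        (cur.filter PySem.Chars.isalpha)
        ((acc.map (List.filter PySem.Chars.isalpha)).filter (fun w => !w.isEmpty))
      = ((PySem.Chars.split₀.go s cur acc).map (List.filter PySem.Chars.isalpha)).filter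
          (fun w => !w.isEmpty) := by
  induction s generalizing cur acc with
  | nil =>
    simp only [List.filter_nil, PySem.Chars.split₀.go]
    by_cases hf : (cur.filter PySem.Chars.isalpha).isEmpty
    · have hnil : cur.filter PySem.Chars.isalpha = [] := List.isEmpty_iff.1 hf
      by_cases he : cur.isEmpty
      · simp [he, hf]
      · have he' : cur.isEmpty = false := by simpa using he
        simp [he', ← List.filter_reverse, hnil]
        intro a ha
        simpa using List.filter_eq_nil_iff.1 hnil a ha
    · have he' : cur.isEmpty = false := by cases cur <;> simp_all
      have hf' : (cur.filter PySem.Chars.isalpha).isEmpty = false := by simpa using hf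
      simp [he', hf', ← List.filter_reverse]
      rw [List.filter_reverse]
      simp [hf']
  | cons c rest ih =>
    by_cases ha : PySem.Chars.isalpha c = true
    · have hs := pv_not_space_of_alpha c ha
      simp only [List.filter_cons, ha, Bool.true_or, if_true, PySem.Chars.split₀.go, hs,
        Bool.false_eq_true, if_false]
      simpa [List.filter_cons, ha] using ih (c :: cur) acc
    · by_cases hs : PySem.Chars.isspace c = true
      · simp only [List.filter_cons, ha, hs, Bool.false_or, PySem.Chars.split₀.go, if_true]
        by_cases he : cur.isEmpty
        · have hf : (cur.filter PySem.Chars.isalpha).isEmpty = true := by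
            cases cur <;> simp_all
          simpa [he, hf] using ih [] acc
        · have he' : cur.isEmpty = false := by simpa using he
          by_cases hf : (cur.filter PySem.Chars.isalpha).isEmpty
          · have hnil : cur.reverse.filter PySem.Chars.isalpha = [] := by
              rw [List.filter_reverse, List.isEmpty_iff.1 hf]; rfl
            have := ih [] (cur.reverse :: acc)
            simp only [List.map_cons, List.filter_cons, hnil, List.filter_nil] at this
            simp only [he', Bool.false_eq_true, if_false, hf, if_true]
            simpa using this
          · have hf' : (cur.filter PySem.Chars.isalpha).isEmpty = false := by simpa using hf
            have hrev : cur.reverse.filter PySem.Chars.isalpha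
                = (cur.filter PySem.Chars.isalpha).reverse := List.filter_reverse
            have := ih [] (cur.reverse :: acc)
            simp only [List.map_cons, List.filter_cons, hrev] at this
            simp only [he', hf', Bool.false_eq_true, if_false]
            rw [← this]
            simp [hf']
      · simp only [Bool.not_eq_true] at ha hs
        simp only [List.filter_cons, ha, hs, Bool.or_self, PySem.Chars.split₀.go,
          Bool.false_eq_true, if_false]
        simpa [List.filter_cons, ha] using ih (c :: cur) acc

theorem pv_split₀_filter (s : List Char) :
    PySem.Chars.split₀ (s.filter (fun c => PySem.Chars.isalpha c || PySem.Chars.isspace c))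
      = ((PySem.Chars.split₀ s).map (List.filter PySem.Chars.isalpha)).filter
          (fun w => !w.isEmpty) := by
  simpa [PySem.Chars.split₀] using pv_go_filter s [] []

theorem pv_main (text : String) : buildwordlist text = buildwordlist_alt text := by
  unfold buildwordlist buildwordlist_alt
  simp only [PySem.Str.split₀, PySem.Str.toList_lower, String.toList_ofList, List.foldl_map]
  have hinner : ∀ w : List Char,
      (PySem.Chars.lower w).foldl
        (fun word x => if PySem.Chars.isalpha x then word ++ [x] else word) ([] : List Char)
      = (PySem.Chars.lower w).filter PySem.Chars.isalpha := by
    intro w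
    simpa using PySem.List.foldl_append_if PySem.Chars.isalpha id (PySem.Chars.lower w) []
  simp only [hinner]
  have hA : ∀ (S : List (List Char)),
      S.foldl (fun l w =>
        if (PySem.Chars.lower w).filter PySem.Chars.isalpha ≠ [] then
          l ++ [String.ofList ((PySem.Chars.lower w).filter PySem.Chars.isalpha)] else l) []
      = (S.filter (fun w => !((PySem.Chars.lower w).filter PySem.Chars.isalpha).isEmpty)).map
          (fun w => String.ofList ((PySem.Chars.lower w).filter PySem.Chars.isalpha)) := by
    intro S
    have hfun : (fun (l : List String) (w : List Char) =>
        if (PySem.Chars.lower w).filter PySem.Chars.isalpha ≠ [] then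
          l ++ [String.ofList ((PySem.Chars.lower w).filter PySem.Chars.isalpha)] else l)
      = (fun l w =>
        if (!((PySem.Chars.lower w).filter PySem.Chars.isalpha).isEmpty) = true then
          l ++ [String.ofList ((PySem.Chars.lower w).filter PySem.Chars.isalpha)] else l) := by
      funext l w
      by_cases h : (PySem.Chars.lower w).filter PySem.Chars.isalpha = []
      · simp [h]
      · simp [h, List.isEmpty_eq_false_iff.2 h]
    rw [hfun]
    simpa using PySem.List.foldl_append_if
      (fun w => !((PySem.Chars.lower w).filter PySem.Chars.isalpha).isEmpty)
      (fun w => String.ofList ((PySem.Chars.lower w).filter PySem.Chars.isalpha))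
      S []
  rw [hA]
  have hcomm : PySem.Chars.lower (text.toList.filter
        (fun c => PySem.Chars.isalpha c || PySem.Chars.isspace c))
      = (PySem.Chars.lower text.toList).filter
        (fun c => PySem.Chars.isalpha c || PySem.Chars.isspace c) := by
    simp only [PySem.Chars.lower, List.filter_map]
    rw [show ((fun c => PySem.Chars.isalpha c || PySem.Chars.isspace c) ∘ PySem.Chars.lowerChar)
        = (fun c => PySem.Chars.isalpha c || PySem.Chars.isspace c) from by
      funext c; simp [Function.comp, pv_isalpha_lowerChar, pv_isspace_lowerChar]]
  rw [hcomm, pv_split₀_filter, pv_split₀_lower]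
  simp only [List.map_map, List.filter_map, Function.comp_def, PySem.Chars.lower]

-- ===== VERDICT (by name: the statement is the Claim_ definition above) =====
theorem buildwordlist_spec : Claim_equal_buildwordlist := by
  intro text _
  show buildwordlist text = buildwordlist_alt text
  exact pv_main text
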